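-- pv_equiv track=rewrite | github.com/xu389007532/QtPDF | BsPDF.py | sort_data1
-- ===== SOURCE A (Python) =====
-- import math
--
-- def sort_data1(std_count, end_count, Layout, cnt_page, std_pdf_file_count2):
--     """
--     順序一棟落Data 處理.
--     :param std_count:一個PDF檔記錄數量
--     :param end_count:尾數箱剩余數量.
--     :param Layout: 排版個數
--     :param cnt_page:一箱張數.
--     :param std_pdf_file_count2:最后一個PDF檔里有多少個是標準張數(一箱張數).
--     :return: list1, list2_start, list2_end, cnt_page_end
--     list1: (seq, cnt_number, layout_seq, pdf_page, layout_number):  正常一個PDF檔的列表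
--         seq: 編號(順序號)
--         cnt_number: 箱號
--         layout_seq:排版順序號
--         pdf_page: PDF 頁碼	**有用到L[3]
--         layout_number: 排版號 **有用到L[4]
--
--     list2_start : 最后一個檔案的標準箱列表.
--     list2_end: 最后一個檔案的尾箱列表.
--     cnt_page_end: 尾箱頁數
--     """
--     # 順序一棟落Data 處理.
--     # 參數
--     # data_count = 12125  # data 數量
--     # width_layout = 3  # 寬排版個數
--     # height_layout = 2  # 高排版個數
--     # cnt_page = 100  # 一箱張數
--     # std_pdf_file_count2 尾箱整箱有多少箱
--     # layout = width_layout * height_layout  # 排版數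
--     cnt_qty = cnt_page * Layout  # 一箱數量
--     end_cnt_page = std_pdf_file_count2 * cnt_qty
--
--     list1 = []  # 一棟落順序
--     for seq in range(1, std_count + 1):  # seq  編號
--         cnt_number = math.ceil(seq / cnt_qty)  # cnt_number 箱號
--         layout_seq = math.ceil(seq / cnt_page)  # layout_seq 排版順序號
--         pdf_page = (divmod(seq - 1, cnt_page)[1] + 1) + cnt_number * cnt_page - cnt_page  # pdf_page   PDF 頁碼
--         layout_number = divmod(layout_seq - 1, Layout)[1] + 1  # layout_number排版號,  1,2,3,1,2,3,1,2,3
--         t1 = (seq, cnt_number, layout_seq, pdf_page, layout_number)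
--         list1.append(t1)
--
--     # list2_start = list1[0:end_cnt_page]
--     list2_start = list1[0:end_cnt_page]
--     list2_end = []
--
--     cnt_page_end = math.ceil(end_count / Layout)
--     cnt_qty_end = cnt_page_end * Layout
--     for seq in range(1, end_count + 1):  # seq  編號
--         cnt_number_end = math.ceil(seq / cnt_qty_end)  # cnt_number 箱號
--         layout_seq_end = math.ceil(seq / cnt_page_end)  # layout_seq 排版順序號
--         pdf_page_end = (divmod(seq - 1, cnt_page_end)[1] + 1)  # pdf_page   PDF 頁碼
--         layout_number = divmod(layout_seq_end - 1, Layout)[1] + 1  # layout_number排版號,  1,2,3,1,2,3,1,2,3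
--         # t2=(std_count+seq, cnt_number_end, layout_seq_end, std_page+pdf_page_end, layout_number)
--         t2 = (seq, cnt_number_end, layout_seq_end, pdf_page_end, layout_number)
--         list2_end.append(t2)
--
--     return list1, list2_start, list2_end, cnt_page_end
-- ===== SOURCE B (Python) =====
-- def sort_data1(std_count, end_count, Layout, cnt_page, std_pdf_file_count2):
--     """Counter-driven rewrite: walks seq once with running counters instead of
--     per-element ceil/divmod formulas."""
--     cnt_qty = cnt_page * Layout
--
--     def walk(n, page, boxed):
--         # Emit (seq, box#, layout seq#, pdf page, layout#) for seq = 1..n by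
--         # advancing running counters; 'boxed' adds the per-box page offset.
--         out = []
--         cnt_number = 1
--         layout_seq = 1
--         layout_number = 1
--         in_page = 1   # position inside the current page, 1..page
--         in_box = 1    # position inside the current box, 1..page*Layout
--         base = 0      # page offset of the current box
--         for seq in range(1, n + 1):
--             out.append((seq, cnt_number, layout_seq, base + in_page, layout_number))
--             if in_page == page:
--                 in_page = 1
--                 layout_seq += 1
--                 layout_number = layout_number + 1 if layout_number < Layout else 1
--             else:
--                 in_page += 1
--             if in_box == page * Layout:
--                 in_box = 1
--                 cnt_number += 1
--                 if boxed:
--                     base += page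
--             else:
--                 in_box += 1
--         return out
--
--     list1 = walk(std_count, cnt_page, True)
--     list2_start = list1[0:std_pdf_file_count2 * cnt_qty]
--     cnt_page_end = -(-end_count // Layout)
--     list2_end = walk(end_count, cnt_page_end, False)
--     return list1, list2_start, list2_end, cnt_page_end
-- ===== Notes on version B (the rewrite author's own statement) =====
-- stated objective: alternative
-- what changed: Replaces A's per-element math.ceil/divmod index formulas with a single stateful counter walk that increments/cycles/resets running box, layout-sequence, layout-number and page counters while emitting each tuple directly.
-- intended difference: On inputs where a numbering loop runs with a non-positive Layout or cnt_page, A returns tuples with zero or negative box/page/layout numbers from its ceil/divmod formulas on negative divisors, while B returns the natural 1-based counter numbering, the intended values for PDF layout. — e.g. on sort_data1(1, 0, -2, 3, 1): A returns ([(1, 0, 1, -2, 1)], [], [], 0), B returns ([(1, 1, 1, 1, 1)], [], [], 0)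
import Mathlib
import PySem

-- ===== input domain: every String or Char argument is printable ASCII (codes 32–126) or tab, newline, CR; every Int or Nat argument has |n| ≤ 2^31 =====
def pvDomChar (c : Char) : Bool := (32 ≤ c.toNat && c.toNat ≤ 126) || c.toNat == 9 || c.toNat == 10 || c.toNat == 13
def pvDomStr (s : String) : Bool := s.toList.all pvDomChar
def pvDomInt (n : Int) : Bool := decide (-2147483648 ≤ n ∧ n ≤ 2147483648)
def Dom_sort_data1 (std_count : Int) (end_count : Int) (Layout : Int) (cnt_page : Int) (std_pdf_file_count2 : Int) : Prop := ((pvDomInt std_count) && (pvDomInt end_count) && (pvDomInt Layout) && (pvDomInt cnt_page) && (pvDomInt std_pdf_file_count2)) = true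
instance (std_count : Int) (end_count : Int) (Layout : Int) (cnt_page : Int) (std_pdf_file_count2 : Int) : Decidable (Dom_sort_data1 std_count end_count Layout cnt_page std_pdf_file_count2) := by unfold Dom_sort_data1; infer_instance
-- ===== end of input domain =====

-- ===== PORT A =====
-- B replaces A's per-element float-ceil/divmod index formulas by one stateful counter walk (objective: alternative).
-- pyCeilDiv is the exact port of math.ceil(a/b): within Dom (|a| <= 2^31) CPython's correctly rounded
-- float division cannot cross an integer boundary, so the float ceil equals the integer ceil -((-a)//b).
def pyCeilDiv (a b : Int) : Int := -(PySem.Int.floordiv (-a) b)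

def sort_data1 (std_count : Int) (end_count : Int) (Layout : Int) (cnt_page : Int) (std_pdf_file_count2 : Int) : (List (Int × Int × Int × Int × Int)) × (List (Int × Int × Int × Int × Int)) × (List (Int × Int × Int × Int × Int)) × Int :=
  let cnt_qty := cnt_page * Layout
  let end_cnt_page := std_pdf_file_count2 * cnt_qty
  let list1 := (PySem.List.pyRange 1 (std_count + 1) 1).foldl (fun acc seq =>
      let cnt_number := pyCeilDiv seq cnt_qty
      let layout_seq := pyCeilDiv seq cnt_page
      let pdf_page := (PySem.Int.mod (seq - 1) cnt_page + 1) + cnt_number * cnt_page - cnt_page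
      let layout_number := PySem.Int.mod (layout_seq - 1) Layout + 1
      acc ++ [(seq, cnt_number, layout_seq, pdf_page, layout_number)]) []
  let list2_start := PySem.List.slice list1 (some 0) (some end_cnt_page)
  let cnt_page_end := pyCeilDiv end_count Layout
  let cnt_qty_end := cnt_page_end * Layout
  let list2_end := (PySem.List.pyRange 1 (end_count + 1) 1).foldl (fun acc seq =>
      let cnt_number_end := pyCeilDiv seq cnt_qty_end
      let layout_seq_end := pyCeilDiv seq cnt_page_end
      let pdf_page_end := PySem.Int.mod (seq - 1) cnt_page_end + 1
      let layout_number := PySem.Int.mod (layout_seq_end - 1) Layout + 1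
      acc ++ [(seq, cnt_number_end, layout_seq_end, pdf_page_end, layout_number)]) []
  (list1, list2_start, list2_end, cnt_page_end)

-- ===== PORT B =====
-- walk's loop body: emit the tuple, then advance the running counters (Source B's two if-statements).
def pvStep (Layout page : Int) (boxed : Bool)
    (st : List (Int × Int × Int × Int × Int) × Int × Int × Int × Int × Int × Int) (seq : Int) :
    List (Int × Int × Int × Int × Int) × Int × Int × Int × Int × Int × Int :=
  match st with
  | (out, cnt_number, layout_seq, layout_number, in_page, in_box, base) =>
    let out := out ++ [(seq, cnt_number, layout_seq, base + in_page, layout_number)]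
    let a : Int × Int × Int :=
      if in_page = page then (1, layout_seq + 1, if layout_number < Layout then layout_number + 1 else 1)
      else (in_page + 1, layout_seq, layout_number)
    let b : Int × Int × Int :=
      if in_box = page * Layout then (1, cnt_number + 1, if boxed then base + page else base)
      else (in_box + 1, cnt_number, base)
    (out, b.2.1, a.2.1, a.2.2, a.1, b.1, b.2.2)

def pvWalk (Layout n page : Int) (boxed : Bool) : List (Int × Int × Int × Int × Int) :=
  ((PySem.List.pyRange 1 (n + 1) 1).foldl (pvStep Layout page boxed) ([], 1, 1, 1, 1, 1, 0)).1

def sort_data1_alt (std_count : Int) (end_count : Int) (Layout : Int) (cnt_page : Int) (std_pdf_file_count2 : Int) : (List (Int × Int × Int × Int × Int)) × (List (Int × Int × Int × Int × Int)) × (List (Int × Int × Int × Int × Int)) × Int :=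
  let cnt_qty := cnt_page * Layout
  let list1 := pvWalk Layout std_count cnt_page true
  let list2_start := PySem.List.slice list1 (some 0) (some (std_pdf_file_count2 * cnt_qty))
  let cnt_page_end := -(PySem.Int.floordiv (-end_count) Layout)
  let list2_end := pvWalk Layout end_count cnt_page_end false
  (list1, list2_start, list2_end, cnt_page_end)

-- ===== PRECONDITION & SPEC =====
-- Pre_ excludes exactly the inputs where A raises ZeroDivisionError: Layout = 0 (the unconditional
-- ceil(end_count/Layout)), cnt_page = 0 with a nonempty first loop, and a negative Layout whose
-- end-loop box size cnt_page_end comes out 0 while that loop runs.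
def Pre_sort_data1 (std_count : Int) (end_count : Int) (Layout : Int) (cnt_page : Int) (std_pdf_file_count2 : Int) : Prop :=
  Layout ≠ 0 ∧ (1 ≤ std_count → cnt_page ≠ 0) ∧
    ¬(Layout < 0 ∧ 1 ≤ end_count ∧ end_count < -Layout)
instance (std_count : Int) (end_count : Int) (Layout : Int) (cnt_page : Int) (std_pdf_file_count2 : Int) : Decidable (Pre_sort_data1 std_count end_count Layout cnt_page std_pdf_file_count2) := by unfold Pre_sort_data1; infer_instance

def pvWitness_sort_data1 : Int × Int × Int × Int × Int := (10, 5, 2, 3, 1)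

-- On inputs where a numbering loop runs with a non-positive Layout or cnt_page, A returns tuples with
-- zero or negative box/page/layout numbers (its ceil/divmod formulas applied to negative divisors),
-- while B returns the natural 1-based counter numbering — the intended values for PDF layout.
def D_sort_data1 (std_count : Int) (end_count : Int) (Layout : Int) (cnt_page : Int) (std_pdf_file_count2 : Int) : Prop :=
  ¬((1 ≤ Layout ∨ (Layout ≠ 0 ∧ std_count < 1 ∧ end_count < 1)) ∧ (1 ≤ cnt_page ∨ std_count < 1))
instance (std_count : Int) (end_count : Int) (Layout : Int) (cnt_page : Int) (std_pdf_file_count2 : Int) : Decidable (D_sort_data1 std_count end_count Layout cnt_page std_pdf_file_count2) := by unfold D_sort_data1; infer_instance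

def Spec_sort_data1 (std_count : Int) (end_count : Int) (Layout : Int) (cnt_page : Int) (std_pdf_file_count2 : Int) (out : (List (Int × Int × Int × Int × Int)) × (List (Int × Int × Int × Int × Int)) × (List (Int × Int × Int × Int × Int)) × Int) : Prop := ¬ D_sort_data1 std_count end_count Layout cnt_page std_pdf_file_count2 → out = sort_data1_alt std_count end_count Layout cnt_page std_pdf_file_count2
instance (std_count : Int) (end_count : Int) (Layout : Int) (cnt_page : Int) (std_pdf_file_count2 : Int) (out : (List (Int × Int × Int × Int × Int)) × (List (Int × Int × Int × Int × Int)) × (List (Int × Int × Int × Int × Int)) × Int) : Decidable (Spec_sort_data1 std_count end_count Layout cnt_page std_pdf_file_count2 out) := by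
  unfold Spec_sort_data1
  haveI h2 : Decidable (out = sort_data1_alt std_count end_count Layout cnt_page std_pdf_file_count2) :=
    @instDecidableEqProd _ _ (by infer_instance)
      (@instDecidableEqProd _ _ (by infer_instance)
        (@instDecidableEqProd _ _ (by infer_instance) (by infer_instance))) _ _
  infer_instance

def pvDiffWitness_sort_data1 : Int × Int × Int × Int × Int := (1, 0, -2, 3, 1)
def pvDiffWitnessOut_sort_data1 : ((List (Int × Int × Int × Int × Int)) × (List (Int × Int × Int × Int × Int)) × (List (Int × Int × Int × Int × Int)) × Int) × ((List (Int × Int × Int × Int × Int)) × (List (Int × Int × Int × Int × Int)) × (List (Int × Int × Int × Int × Int)) × Int) :=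
  (([(1, 0, 1, -2, 1)], [], [], 0), ([(1, 1, 1, 1, 1)], [], [], 0))

-- ===== CLAIM (what is proved, stated in full; the proofs are below) =====
def Claim_unchanged_sort_data1 : Prop := ∀ (std_count : Int) (end_count : Int) (Layout : Int) (cnt_page : Int) (std_pdf_file_count2 : Int), Dom_sort_data1 std_count end_count Layout cnt_page std_pdf_file_count2 → Pre_sort_data1 std_count end_count Layout cnt_page std_pdf_file_count2 → Spec_sort_data1 std_count end_count Layout cnt_page std_pdf_file_count2 (sort_data1 std_count end_count Layout cnt_page std_pdf_file_count2)
def Claim_changed_sort_data1 : Prop := Dom_sort_data1 (pvDiffWitness_sort_data1.1) (pvDiffWitness_sort_data1.2.1) (pvDiffWitness_sort_data1.2.2.1) (pvDiffWitness_sort_data1.2.2.2.1) (pvDiffWitness_sort_data1.2.2.2.2) ∧ Pre_sort_data1 (pvDiffWitness_sort_data1.1) (pvDiffWitness_sort_data1.2.1) (pvDiffWitness_sort_data1.2.2.1) (pvDiffWitness_sort_data1.2.2.2.1) (pvDiffWitness_sort_data1.2.2.2.2) ∧ D_sort_data1 (pvDiffWitness_sort_data1.1) (pvDiffWitness_sort_data1.2.1)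 (pvDiffWitness_sort_data1.2.2.1) (pvDiffWitness_sort_data1.2.2.2.1) (pvDiffWitness_sort_data1.2.2.2.2) ∧ sort_data1 (pvDiffWitness_sort_data1.1) (pvDiffWitness_sort_data1.2.1) (pvDiffWitness_sort_data1.2.2.1) (pvDiffWitness_sort_data1.2.2.2.1) (pvDiffWitness_sort_data1.2.2.2.2) = pvDiffWitnessOut_sort_data1.1 ∧ sort_data1_alt (pvDiffWitness_sort_data1.1) (pvDiffWitness_sort_data1.2.1) (pvDiffWitness_sort_data1.2.2.1) (pvDiffWitness_sort_data1.2.2.2.1) (pvDiffWitness_sort_data1.2.2.2.2) = pvDiffWitnessOut_sort_data1.2 ∧ pvDiffWitnessOut_sort_data1.1 ≠ pvDiffWitnessOut_sort_data1.2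

-- ===== LEMMAS AND PROOFS =====

-- A's loop body, parametrised: page length p, layout count L; boxed = the list1 loop (page offset per box).
def pvStepA (L p : Int) (boxed : Bool) (acc : List (Int × Int × Int × Int × Int)) (seq : Int) :
    List (Int × Int × Int × Int × Int) :=
  let cn := pyCeilDiv seq (p * L)
  let ls := pyCeilDiv seq p
  let pp := if boxed then (PySem.Int.mod (seq - 1) p + 1) + cn * p - p else PySem.Int.mod (seq - 1) p + 1
  let ln := PySem.Int.mod (ls - 1) L + 1
  acc ++ [(seq, cn, ls, pp, ln)]

lemma pv_div_succ {q : Int} (hq : 0 < q) (s : Int) :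
    PySem.Int.floordiv s q =
      if PySem.Int.mod (s - 1) q + 1 = q then PySem.Int.floordiv (s - 1) q + 1
      else PySem.Int.floordiv (s - 1) q := by
  have h := PySem.Int.floordiv_mul_add_mod (s - 1) q
  have h0 := PySem.Int.mod_nonneg (s - 1) hq
  have h1 := PySem.Int.mod_lt (s - 1) hq
  split_ifs with hc
  · rw [PySem.Int.floordiv_eq_iff_of_pos hq]
    constructor <;> nlinarith
  · have hc' : PySem.Int.mod (s - 1) q + 1 < q := lt_of_le_of_ne (by linarith) hc
    rw [PySem.Int.floordiv_eq_iff_of_pos hq]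
    constructor <;> nlinarith

lemma pv_mod_succ {q : Int} (hq : 0 < q) (s : Int) :
    PySem.Int.mod s q =
      if PySem.Int.mod (s - 1) q + 1 = q then 0 else PySem.Int.mod (s - 1) q + 1 := by
  have h := PySem.Int.floordiv_mul_add_mod (s - 1) q
  have h2 := PySem.Int.floordiv_mul_add_mod s q
  rw [pv_div_succ hq s] at h2
  have h0 := PySem.Int.mod_nonneg (s - 1) hq
  have h1 := PySem.Int.mod_lt (s - 1) hq
  have g0 := PySem.Int.mod_nonneg s hq
  have g1 := PySem.Int.mod_lt s hq
  split_ifs with hc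
  · rw [if_pos hc] at h2; nlinarith
  · rw [if_neg hc] at h2; nlinarith

lemma pv_ceil_eq {q : Int} (hq : 0 < q) (s : Int) :
    pyCeilDiv s q = PySem.Int.floordiv (s - 1) q + 1 := by
  have h := PySem.Int.floordiv_mul_add_mod (s - 1) q
  have h0 := PySem.Int.mod_nonneg (s - 1) hq
  have h1 := PySem.Int.mod_lt (s - 1) hq
  have hd : PySem.Int.floordiv (-s) q = -(PySem.Int.floordiv (s - 1) q) - 1 := by
    rw [PySem.Int.floordiv_eq_iff_of_pos hq]
    constructor <;> nlinarith
  unfold pyCeilDiv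
  rw [hd]; ring

lemma pv_floordiv_zero {q : Int} (hq : 0 < q) : PySem.Int.floordiv 0 q = 0 := by
  rw [PySem.Int.floordiv_eq_iff_of_pos hq]
  constructor <;> nlinarith

lemma pv_mod_zero {q : Int} (hq : 0 < q) : PySem.Int.mod 0 q = 0 := by
  have h := PySem.Int.floordiv_mul_add_mod 0 q
  rw [pv_floordiv_zero hq] at h; linarith

-- loop invariant: after processing seq = 1..s-1 the walk state is determined by s.
lemma pv_walk_loop (L p : Int) (hL : 0 < L) (hp : 0 < p) (boxed : Bool) :
    ∀ (k : Nat) (s : Int) (acc : List (Int × Int × Int × Int × Int)), 1 ≤ s →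
      ((PySem.List.pyRange s (s + (k : Int)) 1).foldl (pvStep L p boxed)
        (acc, PySem.Int.floordiv (s - 1) (p * L) + 1, PySem.Int.floordiv (s - 1) p + 1,
         PySem.Int.mod (PySem.Int.floordiv (s - 1) p) L + 1,
         PySem.Int.mod (s - 1) p + 1, PySem.Int.mod (s - 1) (p * L) + 1,
         if boxed then PySem.Int.floordiv (s - 1) (p * L) * p else 0)).1
      = (PySem.List.pyRange s (s + (k : Int)) 1).foldl (pvStepA L p boxed) acc := by
  intro k
  induction k with
  | zero =>
    intro s acc _
    rw [PySem.List.pyRange_one_eq_nil (by push_cast; omega)]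
    simp
  | succ k ih =>
    intro s acc hs
    have hpL : 0 < p * L := mul_pos hp hL
    have hend : s + ((k + 1 : Nat) : Int) = (s + 1) + (k : Int) := by push_cast; ring
    rw [hend, PySem.List.pyRange_one_cons (by omega), List.foldl_cons, List.foldl_cons]
    have hstate : pvStep L p boxed
        (acc, PySem.Int.floordiv (s - 1) (p * L) + 1, PySem.Int.floordiv (s - 1) p + 1,
         PySem.Int.mod (PySem.Int.floordiv (s - 1) p) L + 1,
         PySem.Int.mod (s - 1) p + 1, PySem.Int.mod (s - 1) (p * L) + 1,
         if boxed then PySem.Int.floordiv (s - 1) (p * L) * p else 0) s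
      = (pvStepA L p boxed acc s,
         PySem.Int.floordiv s (p * L) + 1, PySem.Int.floordiv s p + 1,
         PySem.Int.mod (PySem.Int.floordiv s p) L + 1,
         PySem.Int.mod s p + 1, PySem.Int.mod s (p * L) + 1,
         if boxed then PySem.Int.floordiv s (p * L) * p else 0) := by
      have m0 := PySem.Int.mod_nonneg (PySem.Int.floordiv (s - 1) p) hL
      have m1 := PySem.Int.mod_lt (PySem.Int.floordiv (s - 1) p) hL
      have Hln : PySem.Int.mod (PySem.Int.floordiv s p) L =
          if PySem.Int.mod (s - 1) p + 1 = p then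
            (if PySem.Int.mod (PySem.Int.floordiv (s - 1) p) L + 1 = L then 0
             else PySem.Int.mod (PySem.Int.floordiv (s - 1) p) L + 1)
          else PySem.Int.mod (PySem.Int.floordiv (s - 1) p) L := by
        rw [pv_div_succ hp s]
        split_ifs with h h2 h3
        · rw [pv_mod_succ hL (PySem.Int.floordiv (s - 1) p + 1)] at *
          simp only [add_sub_cancel_right] at *
          omega
        · rw [pv_mod_succ hL (PySem.Int.floordiv (s - 1) p + 1)] at *
          simp only [add_sub_cancel_right] at *
          omega
        · rfl
      simp only [pvStep, pvStepA]
      rw [Hln, pv_div_succ hp s, pv_mod_succ hp s, pv_div_succ hpL s, pv_mod_succ hpL s,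
        pv_ceil_eq hpL, pv_ceil_eq hp]
      simp only [add_sub_cancel_right]
      split_ifs <;>
        simp only [Prod.mk.injEq, List.append_right_inj, List.cons.injEq, and_true, true_and] <;>
        repeat' apply And.intro
      all_goals first
        | rfl
        | omega
        | ring
    rw [hstate]
    have := ih (s + 1) (pvStepA L p boxed acc s) (by omega)
    simpa [add_sub_cancel_right] using this

lemma pv_walk_eq (L p n : Int) (hL : 0 < L) (hp : 0 < p) (boxed : Bool) :
    pvWalk L n p boxed = (PySem.List.pyRange 1 (n + 1) 1).foldl (pvStepA L p boxed) [] := by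
  by_cases hn : 0 < n
  · have hpL : 0 < p * L := mul_pos hp hL
    have h := pv_walk_loop L p hL hp boxed n.toNat 1 [] le_rfl
    have hk : (1 : Int) + (n.toNat : Int) = n + 1 := by omega
    rw [hk] at h
    simp only [show (1:Int) - 1 = 0 from rfl, pv_floordiv_zero hp, pv_floordiv_zero hpL,
      pv_mod_zero hp, pv_mod_zero hpL, pv_mod_zero hL, zero_add, zero_mul, ite_self] at h
    unfold pvWalk
    exact h
  · rw [PySem.List.pyRange_one_eq_nil (by omega)]
    simp [pvWalk, PySem.List.pyRange_one_eq_nil (by omega : n + 1 ≤ 1)]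

lemma pv_floordiv_nonneg {q : Int} (hq : 0 < q) {a : Int} (ha : 0 ≤ a) :
    0 ≤ PySem.Int.floordiv a q := by
  have h := PySem.Int.floordiv_mul_add_mod a q
  have h0 := PySem.Int.mod_nonneg a hq
  have h1 := PySem.Int.mod_lt a hq
  nlinarith [sq_nonneg (PySem.Int.floordiv a q)]

lemma pv_list1_eq (L p n : Int) (h : (0 < L ∧ 0 < p) ∨ n < 1) :
    pvWalk L n p true = (PySem.List.pyRange 1 (n + 1) 1).foldl (pvStepA L p true) [] := by
  rcases h with ⟨hL, hp⟩ | hn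
  · exact pv_walk_eq L p n hL hp true
  · have hnil : PySem.List.pyRange 1 (n + 1) 1 = [] := PySem.List.pyRange_one_eq_nil (by omega)
    simp only [pvWalk, hnil, List.foldl_nil]

lemma pv_list2_eq (L e : Int) (h : 0 < L ∨ e < 1) :
    pvWalk L e (-(PySem.Int.floordiv (-e) L)) false
      = (PySem.List.pyRange 1 (e + 1) 1).foldl (pvStepA L (-(PySem.Int.floordiv (-e) L)) false) [] := by
  by_cases he : 1 ≤ e
  · have hL : 0 < L := h.resolve_right (by omega)
    have hpe : 0 < -(PySem.Int.floordiv (-e) L) := by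
      have h1 := pv_ceil_eq hL e
      have h2 := pv_floordiv_nonneg hL (a := e - 1) (by omega)
      unfold pyCeilDiv at h1
      omega
    exact pv_walk_eq L (-(PySem.Int.floordiv (-e) L)) e hL hpe false
  · have hnil : PySem.List.pyRange 1 (e + 1) 1 = [] := PySem.List.pyRange_one_eq_nil (by omega)
    simp only [pvWalk, hnil, List.foldl_nil]

theorem sort_data1_spec_aux (std_count end_count Layout cnt_page std_pdf_file_count2 : Int)
    (hLor : 1 ≤ Layout ∨ (Layout ≠ 0 ∧ std_count < 1 ∧ end_count < 1))
    (hpor : 1 ≤ cnt_page ∨ std_count < 1) :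
    sort_data1 std_count end_count Layout cnt_page std_pdf_file_count2
      = sort_data1_alt std_count end_count Layout cnt_page std_pdf_file_count2 := by
  have h1 : (0 < Layout ∧ 0 < cnt_page) ∨ std_count < 1 := by
    rcases hLor with hL | hL
    · rcases hpor with hp | hp
      · exact Or.inl ⟨hL, hp⟩
      · exact Or.inr hp
    · exact Or.inr hL.2.1
  have h2 : 0 < Layout ∨ end_count < 1 := by
    rcases hLor with hL | hL
    · exact Or.inl hL
    · exact Or.inr hL.2.2
  dsimp only [sort_data1, sort_data1_alt]
  rw [pv_list1_eq Layout cnt_page std_count h1, pv_list2_eq Layout end_count h2]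
  rfl

-- ===== VERDICT (by name: the statements are the Claim_ definitions above) =====
theorem sort_data1_spec : Claim_unchanged_sort_data1 := by
  intro sc ec L cp sp _ _ hnD
  unfold D_sort_data1 at hnD
  have hC := Decidable.of_not_not hnD
  exact sort_data1_spec_aux sc ec L cp sp hC.1 hC.2

theorem sort_data1_changed : Claim_changed_sort_data1 := by
  unfold Claim_changed_sort_data1
  refine ⟨by decide, by decide, by decide, by rfl, by rfl, ?_⟩
  simp [pvDiffWitnessOut_sort_data1]
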